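-- pv_equiv track=rewrite | github.com/AMonFer/Phyton | Parser.py | get_tokens_until_token
-- ===== SOURCE A (Python) =====
-- def get_tokens_until_token(tokens, ref_token):
--     return_tokens = []
--     for token in tokens:
--         if token != ref_token:
--             return_tokens.append(token)
--         else:
--             break
--     return return_tokens
-- ===== SOURCE B (Python) =====
-- def get_tokens_until_token(tokens, ref_token):
--     tokens = list(tokens)
--     try:
--         idx = tokens.index(ref_token)
--     except ValueError:
--         return tokens
--     return tokens[:idx]
-- ===== Notes on version B (the rewrite author's own statement) =====
-- stated objective: idiomatic
-- what changed: B locates the separator once with list.index and returns a slice of the prefix, instead of A's element-by-element append loop with an early break.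
import Mathlib
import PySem

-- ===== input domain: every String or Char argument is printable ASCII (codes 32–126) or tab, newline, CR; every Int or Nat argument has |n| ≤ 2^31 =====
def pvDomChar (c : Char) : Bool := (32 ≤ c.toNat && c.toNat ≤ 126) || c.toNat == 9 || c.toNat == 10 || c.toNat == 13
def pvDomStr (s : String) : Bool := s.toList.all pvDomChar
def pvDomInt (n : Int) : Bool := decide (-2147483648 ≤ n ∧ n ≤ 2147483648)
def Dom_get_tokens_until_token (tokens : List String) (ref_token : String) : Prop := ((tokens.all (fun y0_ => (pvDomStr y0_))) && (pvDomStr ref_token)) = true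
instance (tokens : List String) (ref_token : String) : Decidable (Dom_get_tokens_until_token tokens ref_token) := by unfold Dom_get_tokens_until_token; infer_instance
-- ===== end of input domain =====

-- B finds the separator once with list.index and slices the prefix, instead of A's append loop with a break.

-- ===== PORT A =====
-- the for-loop with early break, carrying the accumulator return_tokens
def getTokensLoop (tokens : List String) (ref_token : String) (return_tokens : List String) : List String :=
  match tokens with
  | [] => return_tokens
  | token :: rest =>
    if token ≠ ref_token then getTokensLoop rest ref_token (return_tokens ++ [token])
    else return_tokens

def get_tokens_until_token (tokens : List String) (ref_token : String) : List String :=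
  getTokensLoop tokens ref_token []

-- ===== PORT B =====
def get_tokens_until_token_alt (tokens : List String) (ref_token : String) : List String :=
  match PySem.List.index? tokens ref_token with
  | some idx => PySem.List.slice tokens none (some (idx : Int))
  | none => tokens

-- ===== PRECONDITION & SPEC =====
def Spec_get_tokens_until_token (tokens : List String) (ref_token : String) (out : List String) : Prop := out = get_tokens_until_token_alt tokens ref_token
instance (tokens : List String) (ref_token : String) (out : List String) : Decidable (Spec_get_tokens_until_token tokens ref_token out) := by unfold Spec_get_tokens_until_token; infer_instance

-- ===== CLAIM (what is proved, stated in full; the proofs are below) =====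
def Claim_equal_get_tokens_until_token : Prop := ∀ (tokens : List String) (ref_token : String), Dom_get_tokens_until_token tokens ref_token → Spec_get_tokens_until_token tokens ref_token (get_tokens_until_token tokens ref_token)

-- ===== LEMMAS AND PROOFS =====
theorem getTokensLoop_eq_alt (tokens : List String) (ref_token : String) (acc : List String) :
    getTokensLoop tokens ref_token acc = acc ++ get_tokens_until_token_alt tokens ref_token := by
  induction tokens generalizing acc with
  | nil => simp [getTokensLoop, get_tokens_until_token_alt, PySem.List.index?]
  | cons t ts ih =>
    by_cases h : t = ref_token
    · subst h
      rw [getTokensLoop]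
      simp only [ne_eq, not_true_eq_false, if_false]
      unfold get_tokens_until_token_alt
      rw [PySem.List.index?_cons_self]
      have h0 : PySem.List.slice (t :: ts) none (some ((0 : Nat) : Int)) = (t :: ts).take 0 :=
        PySem.List.slice_to_natCast (t :: ts) 0
      push_cast at h0
      simp [h0]
    · rw [getTokensLoop]
      simp only [if_pos (by exact h)]
      rw [ih]
      unfold get_tokens_until_token_alt
      rw [PySem.List.index?_cons_of_ne (v := ref_token) (xs := ts) (x := t) h]
      cases hidx : PySem.List.index? ts ref_token with
      | none => simp
      | some k =>
        simp only [Option.map_some]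
        have h1 : PySem.List.slice ts none (some (k : Int)) = ts.take k :=
          PySem.List.slice_to_natCast ts k
        have h2 : PySem.List.slice (t :: ts) none (some ((k + 1 : Nat) : Int)) = (t :: ts).take (k + 1) :=
          PySem.List.slice_to_natCast (t :: ts) (k + 1)
        push_cast at h2 ⊢
        rw [h1, h2]
        simp [List.take_succ_cons]

-- ===== VERDICT (by name: the statement is the Claim_ definition above) =====
theorem get_tokens_until_token_spec : Claim_equal_get_tokens_until_token := by
  intro tokens ref_token _
  unfold Spec_get_tokens_until_token get_tokens_until_token
  simpa using getTokensLoop_eq_alt tokens ref_token []
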